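-- pv_equiv track=rewrite | github.com/Bombbird2001/march-hols | assignments/05-arcade/assignment.py | game_length
-- ===== SOURCE A (Python) =====
-- def game_length(a, x, b):
-- 	"""
-- 	Args:
-- 		a: int
-- 			Interval at which Aaron deals a damage
-- 		x: int
-- 			Interval at which Xuanchun deals a damage
-- 		b: int
-- 			Amount of damage a boss can take before it is dead
--
-- 	Returns:
-- 		An int, the amount of time it takes for the game to be over.
-- 	"""
--
-- 	# Your code here
-- 	t = 0
-- 	while True:
-- 		dmg = 0
-- 		for i in range(t + 1):
-- 			if (i % a == 0):
-- 				dmg += 1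
-- 			if (i % x == 0):
-- 				dmg += 1
-- 		if dmg >= b:
-- 			break
-- 		t += 1
--
-- 	return t
-- ===== SOURCE B (Python) =====
-- def game_length(a, x, b):
--     """Binary search on the closed-form damage dmg(t) = t//|a| + t//|x| + 2."""
--     aa, xx = abs(a), abs(x)
--     if b <= 2:
--         return 0
--     lo, hi = 0, (b - 2) * min(aa, xx)  # dmg(lo) < b <= dmg(hi)
--     while hi - lo > 1:
--         mid = (lo + hi) // 2
--         if mid // aa + mid // xx + 2 >= b:
--             hi = mid
--         else:
--             lo = mid
--     return hi
-- ===== Notes on version B (the rewrite author's own statement) =====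
-- stated objective: faster
-- what changed: Replaced the O(t^2) simulate-every-tick loop (recounting damage from scratch each tick) by the closed form dmg(t)=t//|a|+t//|x|+2 and a binary search for the smallest t with dmg(t)>=b.
import Mathlib
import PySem

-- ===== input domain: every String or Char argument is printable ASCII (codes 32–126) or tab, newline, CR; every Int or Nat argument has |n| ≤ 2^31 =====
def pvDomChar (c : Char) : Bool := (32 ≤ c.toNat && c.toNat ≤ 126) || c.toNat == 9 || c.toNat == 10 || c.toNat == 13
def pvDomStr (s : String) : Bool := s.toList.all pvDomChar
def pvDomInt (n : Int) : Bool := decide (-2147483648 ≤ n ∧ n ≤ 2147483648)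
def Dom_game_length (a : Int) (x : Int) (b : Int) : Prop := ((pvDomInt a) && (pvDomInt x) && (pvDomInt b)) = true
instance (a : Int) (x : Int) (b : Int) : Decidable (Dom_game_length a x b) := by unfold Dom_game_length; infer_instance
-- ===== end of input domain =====

-- B replaces A's quadratic tick-by-tick simulation by a binary search on the
-- closed-form damage dmg(t) = t//|a| + t//|x| + 2 (objective: faster, asymptotic).


-- ===== PORT A =====
-- the body of the while-True loop: dmg recomputed from scratch over range(t+1),
-- then break (return t) or t += 1.  `fuel` is only a totality guard: the Python
-- loop has no bound, and under Pre_ the fuel is proved never to run out.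
def gameLoopA (a x b : Int) : Nat → Int → Int
  | 0, t => t
  | fuel + 1, t =>
    let dmg := (PySem.List.pyRange 0 (t + 1) 1).foldl (fun dmg i =>
      let dmg := if PySem.Int.mod i a = 0 then dmg + 1 else dmg
      if PySem.Int.mod i x = 0 then dmg + 1 else dmg) 0
    if dmg ≥ b then t else gameLoopA a x b fuel (t + 1)

def game_length (a : Int) (x : Int) (b : Int) : Int :=
  gameLoopA a x b ((b.natAbs + 2) * (a.natAbs + x.natAbs + 2) + 2) 0

-- ===== PORT B =====
-- binary search: invariant dmg(lo) < b ≤ dmg(hi); returns hi when hi - lo ≤ 1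
def bsearchB (aa xx b : Int) : Nat → Int → Int → Int
  | 0, _, hi => hi
  | fuel + 1, lo, hi =>
    if hi - lo > 1 then
      let mid := PySem.Int.floordiv (lo + hi) 2
      if PySem.Int.floordiv mid aa + PySem.Int.floordiv mid xx + 2 ≥ b then
        bsearchB aa xx b fuel lo mid
      else
        bsearchB aa xx b fuel mid hi
    else hi

def game_length_alt (a : Int) (x : Int) (b : Int) : Int :=
  let aa := |a|
  let xx := |x|
  if b ≤ 2 then 0
  else bsearchB aa xx b (((b - 2) * min aa xx).toNat) 0 ((b - 2) * min aa xx)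

-- ===== PRECONDITION & SPEC =====
-- A raises ZeroDivisionError (i % 0 at i = 0) when a = 0 or x = 0; Pre_ excludes exactly those.
def Pre_game_length (a : Int) (x : Int) (b : Int) : Prop := a ≠ 0 ∧ x ≠ 0
instance (a : Int) (x : Int) (b : Int) : Decidable (Pre_game_length a x b) := by unfold Pre_game_length; infer_instance
def pvWitness_game_length : Int × Int × Int := (2, 3, 10)

def Spec_game_length (a : Int) (x : Int) (b : Int) (out : Int) : Prop := out = game_length_alt a x b
instance (a : Int) (x : Int) (b : Int) (out : Int) : Decidable (Spec_game_length a x b out) := by unfold Spec_game_length; infer_instance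

-- ===== CLAIM (what is proved, stated in full; the proofs are below) =====
def Claim_equal_game_length : Prop := ∀ (a : Int) (x : Int) (b : Int), Dom_game_length a x b → Pre_game_length a x b → Spec_game_length a x b (game_length a x b)

-- ===== LEMMAS AND PROOFS =====

-- closed-form damage
def dmgC (aa xx t : Int) : Int := t / aa + t / xx + 2

lemma ediv_succ (d t : Int) (hd : 0 < d) (ht : 0 ≤ t) :
    (t + 1) / d = t / d + (if d ∣ (t + 1) then 1 else 0) := by
  have h1 : d * (t / d) + t % d = t := Int.ediv_add_emod t d
  have h2 : 0 ≤ t % d := Int.emod_nonneg t (by omega)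
  have h3 : t % d < d := Int.emod_lt_of_pos t hd
  by_cases hr : t % d = d - 1
  · have hdvd : d ∣ (t + 1) := ⟨t / d + 1, by rw [mul_add, mul_one]; omega⟩
    rw [if_pos hdvd]
    have : t + 1 = d * (t / d + 1) := by rw [mul_add, mul_one]; omega
    rw [this, Int.mul_ediv_cancel_left _ (by omega)]
  · have heq : t + 1 = (t % d + 1) + d * (t / d) := by omega
    have hq : (t + 1) / d = t / d := by
      rw [heq, Int.add_mul_ediv_left _ _ (show d ≠ 0 by omega),
        Int.ediv_eq_zero_of_lt (by omega) (by omega), zero_add]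
    have hmod : (t + 1) % d = t % d + 1 := by
      rw [heq, Int.add_mul_emod_self_left, Int.emod_eq_of_lt (by omega) (by omega)]
    have hndvd : ¬ d ∣ (t + 1) := by
      rw [Int.dvd_iff_emod_eq_zero, hmod]; omega
    rw [if_neg hndvd, hq, add_zero]

lemma fold_dmg_eq (a x t : Int) (ha : a ≠ 0) (hx : x ≠ 0) (ht : 0 ≤ t) :
    (PySem.List.pyRange 0 (t + 1) 1).foldl (fun dmg i =>
      let dmg := if PySem.Int.mod i a = 0 then dmg + 1 else dmg
      if PySem.Int.mod i x = 0 then dmg + 1 else dmg) 0 = dmgC |a| |x| t := by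
  have haa : (0:Int) < |a| := abs_pos.mpr ha
  have hxx : (0:Int) < |x| := abs_pos.mpr hx
  induction t, ht using Int.le_induction with
  | base =>
    rw [show ((0:Int) + 1) = 0 + 1 from rfl, PySem.List.pyRange_one_singleton]
    have hma : PySem.Int.mod 0 a = 0 := by
      rw [PySem.Int.mod_eq_zero_iff_dvd]; exact dvd_zero a
    have hmx : PySem.Int.mod 0 x = 0 := by
      rw [PySem.Int.mod_eq_zero_iff_dvd]; exact dvd_zero x
    simp [hma, hmx, dmgC]
  | succ t ht ih =>
    rw [PySem.List.pyRange_one_succ_right (show (0:Int) ≤ t + 1 by omega),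
      List.foldl_append, ih]
    simp only [List.foldl_cons, List.foldl_nil]
    have hA : (PySem.Int.mod (t + 1) a = 0) ↔ |a| ∣ (t + 1) := by
      rw [PySem.Int.mod_eq_zero_iff_dvd]; exact (abs_dvd _ _).symm
    have hX : (PySem.Int.mod (t + 1) x = 0) ↔ |x| ∣ (t + 1) := by
      rw [PySem.Int.mod_eq_zero_iff_dvd]; exact (abs_dvd _ _).symm
    have eA := ediv_succ |a| t haa ht
    have eX := ediv_succ |x| t hxx ht
    simp only [dmgC] at *
    rw [eA, eX]
    simp only [hA, hX]
    split_ifs <;> omega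

lemma dmgC_mono (aa xx : Int) (ha : 0 < aa) (hx : 0 < xx) {s t : Int} (h : s ≤ t) :
    dmgC aa xx s ≤ dmgC aa xx t := by
  unfold dmgC
  have h1 := Int.ediv_le_ediv ha h
  have h2 := Int.ediv_le_ediv hx h
  omega

lemma loopA_eq (a x b : Int) (ha : a ≠ 0) (hx : x ≠ 0) :
    ∀ (fuel : Nat) (t r : Int), 0 ≤ t → t ≤ r → b ≤ dmgC |a| |x| r →
      (∀ s, t ≤ s → s < r → ¬ b ≤ dmgC |a| |x| s) → (r - t).toNat < fuel →
      gameLoopA a x b fuel t = r := by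
  intro fuel
  induction fuel with
  | zero => intro t r _ _ _ _ hf; omega
  | succ n ih =>
    intro t r ht htr hPr hmin hf
    rw [gameLoopA]
    simp only [fold_dmg_eq a x t ha hx ht]
    by_cases hc : dmgC |a| |x| t ≥ b
    · have hteq : t = r := by
        by_contra hne
        exact hmin t le_rfl (by omega) hc
      subst hteq
      rw [if_pos hc]
    · have hne : t ≠ r := fun h => hc (h ▸ hPr)
      simp only [ge_iff_le, hc, if_false]
      exact ih (t + 1) r (by omega) (by omega) hPr (fun s hs1 hs2 => hmin s (by omega) hs2) (by omega)

lemma bsearchB_correct (aa xx b : Int) (ha : 0 < aa) (hx : 0 < xx) :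
    ∀ (n : Nat) (lo hi : Int), (hi - lo).toNat ≤ n + 1 → lo < hi →
      ¬ b ≤ dmgC aa xx lo → b ≤ dmgC aa xx hi →
      b ≤ dmgC aa xx (bsearchB aa xx b n lo hi) ∧
      ¬ b ≤ dmgC aa xx (bsearchB aa xx b n lo hi - 1) ∧
      lo < bsearchB aa xx b n lo hi ∧ bsearchB aa xx b n lo hi ≤ hi := by
  intro n
  induction n with
  | zero =>
    intro lo hi hn hlt hlo hhi
    have : hi = lo + 1 := by omega
    rw [bsearchB]
    refine ⟨hhi, ?_, by omega, le_rfl⟩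
    rw [this]; simpa using hlo
  | succ n ih =>
    intro lo hi hn hlt hlo hhi
    rw [bsearchB]
    by_cases h : hi - lo > 1
    · have h1 := (PySem.Int.le_floordiv_iff_mul_le (a := lo + hi) (b := 2) (q := lo + 1) (by omega)).mpr (by omega)
      have h2 := (PySem.Int.floordiv_lt_iff_lt_mul (a := lo + hi) (b := 2) (q := hi) (by omega)).mpr (by omega)
      set mid := PySem.Int.floordiv (lo + hi) 2 with hmid
      by_cases hP : PySem.Int.floordiv mid aa + PySem.Int.floordiv mid xx + 2 ≥ b
      · have hda : PySem.Int.floordiv mid aa = mid / aa := PySem.Int.floordiv_eq_ediv_of_pos ha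
        have hdx : PySem.Int.floordiv mid xx = mid / xx := PySem.Int.floordiv_eq_ediv_of_pos hx
        have hP' : b ≤ dmgC aa xx mid := by unfold dmgC; omega
        simp only [h, if_pos, hP]
        have := ih lo mid (by omega) (by omega) hlo hP'
        exact ⟨this.1, this.2.1, this.2.2.1, by omega⟩
      · have hda : PySem.Int.floordiv mid aa = mid / aa := PySem.Int.floordiv_eq_ediv_of_pos ha
        have hdx : PySem.Int.floordiv mid xx = mid / xx := PySem.Int.floordiv_eq_ediv_of_pos hx
        have hP' : ¬ b ≤ dmgC aa xx mid := by unfold dmgC; omega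
        simp only [h, if_pos, hP, if_neg, not_false_iff]
        have := ih mid hi (by omega) (by omega) hP' hhi
        exact ⟨this.1, this.2.1, by omega, this.2.2.2⟩
    · simp only [h, if_neg, not_false_iff]
      have : hi = lo + 1 := by omega
      refine ⟨hhi, ?_, by omega, le_rfl⟩
      rw [this]; simpa using hlo

-- ===== VERDICT (by name: the statement is the Claim_ definition above) =====
theorem game_length_spec : Claim_equal_game_length := by
  intro a x b _ hpre
  obtain ⟨ha, hx⟩ := hpre
  have haa : (0:Int) < |a| := abs_pos.mpr ha
  have hxx : (0:Int) < |x| := abs_pos.mpr hx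
  unfold Spec_game_length game_length game_length_alt
  simp only []
  by_cases hb : b ≤ 2
  · -- dmg(0) = 2 ≥ b, A breaks immediately with t = 0
    rw [if_pos hb]
    apply loopA_eq a x b ha hx _ 0 0 le_rfl le_rfl
    · unfold dmgC; simp; omega
    · intro s hs1 hs2; omega
    · omega
  · rw [if_neg hb]
    have hmin : (0:Int) < min |a| |x| := lt_min haa hxx
    set H : Int := (b - 2) * min |a| |x| with hH
    have hH0 : 0 < H := by
      apply mul_pos (by omega) hmin
    have hPH : b ≤ dmgC |a| |x| H := by
      unfold dmgC
      rcases le_total |a| |x| with hle | hle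
      · have hm : min |a| |x| = |a| := min_eq_left hle
        have h1 : H / |a| = b - 2 := by rw [hH, hm]; exact Int.mul_ediv_cancel _ (by omega)
        have h2 : 0 ≤ H / |x| := Int.ediv_nonneg (by omega) (by omega)
        omega
      · have hm : min |a| |x| = |x| := min_eq_right hle
        have h1 : H / |x| = b - 2 := by rw [hH, hm]; exact Int.mul_ediv_cancel _ (by omega)
        have h2 : 0 ≤ H / |a| := Int.ediv_nonneg (by omega) (by omega)
        omega
    have hP0 : ¬ b ≤ dmgC |a| |x| 0 := by
      unfold dmgC; simp; omega
    obtain ⟨hres1, hres2, hres3, hres4⟩ :=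
      bsearchB_correct |a| |x| b haa hxx (H.toNat) 0 H (by omega) hH0 hP0 hPH
    set res := bsearchB |a| |x| b (H.toNat) 0 H with hres
    apply loopA_eq a x b ha hx _ 0 res (le_rfl) (by omega) hres1
    · intro s hs1 hs2
      intro hPs
      exact hres2 (le_trans hPs (dmgC_mono _ _ haa hxx (by omega)))
    · -- fuel suffices: res ≤ H ≤ (|b|+2)*(|a|+|x|+2)
      have hHb : H ≤ ((b.natAbs:Int) + 2) * ((a.natAbs:Int) + (x.natAbs:Int) + 2) := by
        rw [hH]
        apply mul_le_mul
        · omega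
        · have : min |a| |x| ≤ |a| := min_le_left _ _
          have := Int.abs_eq_natAbs a
          have := Int.abs_eq_natAbs x
          omega
        · omega
        · omega
      have : res ≤ ((b.natAbs:Int) + 2) * ((a.natAbs:Int) + (x.natAbs:Int) + 2) := le_trans hres4 hHb
      have hcast : (((b.natAbs + 2) * (a.natAbs + x.natAbs + 2) + 2 : Nat) : Int)
          = ((b.natAbs:Int) + 2) * ((a.natAbs:Int) + (x.natAbs:Int) + 2) + 2 := by push_cast; ring
      omega
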